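-- pv_equiv track=rewrite | github.com/saifan340/Text_to_SQL | app.py | is_sql_prompt
-- ===== SOURCE A (Python) =====
-- SQL_KEYWORDS = ("SELECT", "WITH", "INSERT", "UPDATE", "DELETE", "PRAGMA", "CREATE", "DROP", "ALTER")
--
-- def is_sql_prompt(prompt: str) -> bool:
--     if not prompt:
--         return False
--     trimmed = prompt.strip()
--     # check start
--     upper = trimmed.upper()
--     for kw in SQL_KEYWORDS:
--         if upper.startswith(kw + " ") or upper == kw:
--             return True
--     # also treat single-line statements that end with a semicolon as SQL
--     if trimmed.endswith(';'):
--         return True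
--     return False
-- ===== SOURCE B (Python) =====
-- _WS = " \t\n\r\v\f"
-- _KW_BY_LEN = {
--     4: ("WITH", "DROP"),
--     5: ("ALTER",),
--     6: ("SELECT", "INSERT", "UPDATE", "DELETE", "PRAGMA", "CREATE"),
-- }
--
-- def is_sql_prompt(prompt: str) -> bool:
--     # hand-rolled scan: trim by slicing, then test the last char and the
--     # uppercased first space-delimited token against a length-indexed table
--     s = prompt
--     while s and s[0] in _WS:
--         s = s[1:]
--     while s and s[-1] in _WS:
--         s = s[:-1]
--     if not s:
--         return False
--     if s[-1] == ';':
--         return True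
--     word = ""
--     for ch in s:
--         if ch == ' ':
--             break
--         word += ch.upper()
--     return word in _KW_BY_LEN.get(len(word), ())
-- ===== Notes on version B (the rewrite author's own statement) =====
-- stated objective: alternative
-- what changed: Replaces A's library pipeline (strip, whole-string upper, a 9-keyword loop of startswith tests) by a hand-rolled scanner: trim whitespace by slicing from both ends, decide the semicolon case from the last character, build the uppercased first space-delimited token once in a single pass, and look it up in a length-indexed keyword table.
import Mathlib
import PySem

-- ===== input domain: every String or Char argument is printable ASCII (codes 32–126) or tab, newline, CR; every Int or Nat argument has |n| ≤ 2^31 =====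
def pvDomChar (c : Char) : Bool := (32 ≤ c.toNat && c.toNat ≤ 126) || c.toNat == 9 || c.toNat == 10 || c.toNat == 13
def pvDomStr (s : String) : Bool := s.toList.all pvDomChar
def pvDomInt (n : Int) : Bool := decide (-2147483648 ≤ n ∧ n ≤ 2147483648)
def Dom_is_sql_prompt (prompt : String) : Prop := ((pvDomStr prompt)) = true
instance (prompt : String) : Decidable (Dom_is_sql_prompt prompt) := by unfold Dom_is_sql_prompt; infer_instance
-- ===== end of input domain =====

-- B replaces A's strip/upper/startswith-loop pipeline by a hand-rolled scanner (slice-trim from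
-- both ends, last-char semicolon test, one-pass token build) with a length-indexed keyword table.

-- ===== PORT A =====
def pvSqlKeywords : List (List Char) :=
  ["SELECT".toList, "WITH".toList, "INSERT".toList, "UPDATE".toList, "DELETE".toList,
   "PRAGMA".toList, "CREATE".toList, "DROP".toList, "ALTER".toList]

def is_sql_prompt (prompt : String) : Bool :=
  if prompt.toList = [] then false
  else
    let trimmed := PySem.Chars.strip prompt.toList
    let upper := PySem.Chars.upper trimmed
    if pvSqlKeywords.any (fun kw => PySem.Chars.startswith upper (kw ++ [' ']) || upper == kw) then
      true
    else if PySem.Chars.endswith trimmed [';'] then true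
    else false

-- ===== PORT B =====
-- membership in the literal _WS = " \t\n\r\v\f"
def pvIsWs (c : Char) : Bool :=
  c = ' ' || c = '\t' || c = '\n' || c = '\r' || c = '\x0b' || c = '\x0c'

-- while s and s[0] in _WS: s = s[1:]
def pvLTrim : List Char → List Char
  | [] => []
  | c :: t => if pvIsWs c then pvLTrim t else c :: t

-- while s and s[-1] in _WS: s = s[:-1]
def pvRTrim (s : List Char) : List Char :=
  match h : s.getLast? with
  | none => s
  | some c => if pvIsWs c then pvRTrim s.dropLast else s
termination_by s.length
decreasing_by
  have : s ≠ [] := by intro e; rw [e] at h; simp at h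
  cases s with
  | nil => exact absurd rfl this
  | cons a t => simp

-- for ch in s: if ch == ' ': break; word += ch.upper()   (upperChar is exact on the ASCII domain)
def pvWord : List Char → List Char
  | [] => []
  | c :: t => if c = ' ' then [] else PySem.Chars.upperChar c :: pvWord t

-- _KW_BY_LEN = {4: ("WITH","DROP"), 5: ("ALTER",), 6: (...)}
def pvKwByLen : PySem.Dict Int (List (List Char)) :=
  PySem.Dict.ofList
    [((4 : Int), ["WITH".toList, "DROP".toList]),
     ((5 : Int), ["ALTER".toList]),
     ((6 : Int), ["SELECT".toList, "INSERT".toList, "UPDATE".toList,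
                  "DELETE".toList, "PRAGMA".toList, "CREATE".toList])]

def is_sql_prompt_alt (prompt : String) : Bool :=
  let s := pvRTrim (pvLTrim prompt.toList)
  if hs : s = [] then false
  else if s.getLast hs = ';' then true
  else
    let word := pvWord s
    (pvKwByLen.getD ((word.length : Int)) []).contains word

-- ===== PRECONDITION & SPEC =====
def Spec_is_sql_prompt (prompt : String) (out : Bool) : Prop := out = is_sql_prompt_alt prompt
instance (prompt : String) (out : Bool) : Decidable (Spec_is_sql_prompt prompt out) := by unfold Spec_is_sql_prompt; infer_instance

-- ===== CLAIM (what is proved, stated in full; the proofs are below) =====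
def Claim_equal_is_sql_prompt : Prop := ∀ (prompt : String), Dom_is_sql_prompt prompt → Spec_is_sql_prompt prompt (is_sql_prompt prompt)

-- ===== LEMMAS AND PROOFS =====

lemma char_eq_iff_toNat (c d : Char) : (c = d) ↔ c.toNat = d.toNat :=
  ⟨fun h => h ▸ rfl, fun h => Char.ext (UInt32.toNat_inj.mp h)⟩

lemma pvIsWs_eq_isspace {c : Char} (h : pvDomChar c = true) :
    pvIsWs c = PySem.Chars.isspace c := by
  simp only [pvDomChar, Bool.or_eq_true, Bool.and_eq_true, beq_iff_eq, decide_eq_true_eq] at h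
  rw [Bool.eq_iff_iff]
  simp only [pvIsWs, PySem.Chars.isspace, char_eq_iff_toNat, Bool.or_eq_true, Bool.and_eq_true,
    decide_eq_true_eq, show (' ').toNat = 32 from rfl, show ('\t').toNat = 9 from rfl,
    show ('\n').toNat = 10 from rfl, show ('\r').toNat = 13 from rfl,
    show ('\x0b').toNat = 11 from rfl, show ('\x0c').toNat = 12 from rfl]
  omega

lemma pvLTrim_eq_lstrip {s : List Char} (h : s.all pvDomChar = true) :
    pvLTrim s = PySem.Chars.lstrip s := by
  induction s with
  | nil => rfl
  | cons c t ih =>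
    simp only [List.all_cons, Bool.and_eq_true] at h
    rw [pvLTrim, PySem.Chars.lstrip, List.dropWhile_cons, ← pvIsWs_eq_isspace h.1]
    by_cases hw : pvIsWs c
    · simp [hw, ih h.2, PySem.Chars.lstrip]
    · simp [hw]

lemma pvRTrim_eq_rstrip {s : List Char} (h : s.all pvDomChar = true) :
    pvRTrim s = PySem.Chars.rstrip s := by
  induction hn : s.length using Nat.strong_induction_on generalizing s with
  | _ n ih =>
  rw [pvRTrim]
  cases hL : s.getLast? with
  | none =>
    have : s = [] := List.getLast?_eq_none_iff.mp hL
    simp [this, PySem.Chars.rstrip]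
  | some c =>
    have hne : s ≠ [] := by intro e; rw [e] at hL; simp at hL
    have hsd : s = s.dropLast ++ [c] := by
      conv_lhs => rw [← List.dropLast_append_getLast hne]
      rw [List.getLast?_eq_some_getLast hne] at hL
      simp at hL
      rw [hL]
    have hcdom : pvDomChar c = true := by
      have : c ∈ s := by rw [hsd]; simp
      exact (List.all_eq_true.mp h) c this
    have hdl : s.dropLast.all pvDomChar = true := by
      rw [List.all_eq_true] at h ⊢
      intro x hx
      exact h x (List.dropLast_sublist s |>.mem hx)
    have hrev : s.reverse = c :: s.dropLast.reverse := by
      conv_lhs => rw [hsd]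
      simp
    have hws : PySem.Chars.isspace c = pvIsWs c := (pvIsWs_eq_isspace hcdom).symm
    by_cases hw : pvIsWs c
    · simp only [hw, if_true]
      rw [ih s.dropLast.length (by rw [← hn, hsd]; simp) hdl rfl]
      unfold PySem.Chars.rstrip
      rw [hrev, List.dropWhile_cons, hws]
      simp [hw]
    · simp only [hw, if_false]
      unfold PySem.Chars.rstrip
      rw [hrev, List.dropWhile_cons, hws]
      simp only [hw]
      rw [← hrev]; simp

lemma upperChar_ne_space {c : Char} (h : c ≠ ' ') : PySem.Chars.upperChar c ≠ ' ' := by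
  unfold PySem.Chars.upperChar
  split
  · rename_i hl
    have hb : 97 ≤ c.toNat ∧ c.toNat ≤ 122 := by
      simpa [PySem.Chars.islower, Bool.and_eq_true, decide_eq_true_eq] using hl
    intro e
    have h2 := congrArg Char.toNat e
    rw [Char.toNat_ofNat] at h2
    have hv : (c.toNat - 32).isValidChar := Or.inl (by omega)
    rw [if_pos hv] at h2
    simp [show (' ').toNat = 32 from rfl] at h2
    omega
  · exact h

lemma pvWord_eq_takeWhile (s : List Char) :
    pvWord s = (PySem.Chars.upper s).takeWhile (fun c => c ≠ ' ') := by
  induction s with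
  | nil => rfl
  | cons c t ih =>
    rw [pvWord, PySem.Chars.upper, List.map_cons, List.takeWhile_cons]
    by_cases hc : c = ' '
    · simp [hc, show PySem.Chars.upperChar ' ' = ' ' from rfl]
    · simp only [hc, if_false, decide_not]
      simp [upperChar_ne_space hc, ih, PySem.Chars.upper]

lemma takeWhile_eq_keyword (kw : List Char) (h : ' ' ∉ kw) :
    ∀ cs : List Char, (List.takeWhile (fun c => !decide (c = ' ')) cs = kw ↔ ((kw ++ [' ']) <+: cs ∨ cs = kw)) := by
  induction kw with
  | nil =>
    intro cs
    cases cs with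
    | nil => simp
    | cons c t =>
      by_cases hc : c = ' '
      · simp [hc]
      · simp [hc, List.cons_prefix_cons, Ne.symm hc]
  | cons k ks ih =>
    have hk : ' ' ≠ k := fun e => h (e ▸ List.mem_cons_self ..)
    have hks : ' ' ∉ ks := fun e => h (List.mem_cons_of_mem _ e)
    intro cs
    cases cs with
    | nil => simp
    | cons c t =>
      by_cases hc : c = ' '
      · subst hc
        simp [List.cons_prefix_cons, hk, Ne.symm hk]
      · simp [hc, List.cons_prefix_cons]
        rw [ih hks t]
        constructor
        · rintro ⟨h1, h2 | h2⟩
          · exact Or.inl ⟨h1.symm, h2⟩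
          · exact Or.inr ⟨h1, h2⟩
        · rintro (⟨h1, h2⟩ | ⟨h1, h2⟩)
          · exact ⟨h1.symm, Or.inl h2⟩
          · exact ⟨h1, Or.inr h2⟩

lemma token_test_eq (upper kw : List Char) (h : ' ' ∉ kw) :
    (upper.takeWhile (fun c => c ≠ ' ') == kw)
      = (PySem.Chars.startswith upper (kw ++ [' ']) || upper == kw) := by
  rw [Bool.eq_iff_iff]
  simp only [beq_iff_eq, Bool.or_eq_true, PySem.Chars.startswith_iff, decide_not]
  exact takeWhile_eq_keyword kw h upper

lemma beq_false_of_length_ne {w kw : List Char} (h : w.length ≠ kw.length) :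
    (w == kw) = false := by
  rw [beq_eq_false_iff_ne]
  intro e; exact h (by rw [e])

lemma bucket_eq (w : List Char) :
    ((pvKwByLen.getD ((w.length : Int)) []).contains w) = pvSqlKeywords.contains w := by
  by_cases h4 : w.length = 4
  · have e : pvKwByLen.getD ((w.length : Int)) [] = ["WITH".toList, "DROP".toList] := by
      rw [h4]; decide
    rw [e]
    simp only [pvSqlKeywords, List.contains_cons, List.contains_nil,
      beq_false_of_length_ne (by rw [h4]; decide : w.length ≠ ("SELECT".toList).length),
      beq_false_of_length_ne (by rw [h4]; decide : w.length ≠ ("INSERT".toList).length),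
      beq_false_of_length_ne (by rw [h4]; decide : w.length ≠ ("UPDATE".toList).length),
      beq_false_of_length_ne (by rw [h4]; decide : w.length ≠ ("DELETE".toList).length),
      beq_false_of_length_ne (by rw [h4]; decide : w.length ≠ ("PRAGMA".toList).length),
      beq_false_of_length_ne (by rw [h4]; decide : w.length ≠ ("CREATE".toList).length),
      beq_false_of_length_ne (by rw [h4]; decide : w.length ≠ ("ALTER".toList).length)]
    simp
  · by_cases h5 : w.length = 5
    · have e : pvKwByLen.getD ((w.length : Int)) [] = ["ALTER".toList] := by
        rw [h5]; decide
      rw [e]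
      simp only [pvSqlKeywords, List.contains_cons, List.contains_nil,
        beq_false_of_length_ne (by rw [h5]; decide : w.length ≠ ("SELECT".toList).length),
        beq_false_of_length_ne (by rw [h5]; decide : w.length ≠ ("WITH".toList).length),
        beq_false_of_length_ne (by rw [h5]; decide : w.length ≠ ("INSERT".toList).length),
        beq_false_of_length_ne (by rw [h5]; decide : w.length ≠ ("UPDATE".toList).length),
        beq_false_of_length_ne (by rw [h5]; decide : w.length ≠ ("DELETE".toList).length),
        beq_false_of_length_ne (by rw [h5]; decide : w.length ≠ ("PRAGMA".toList).length),
        beq_false_of_length_ne (by rw [h5]; decide : w.length ≠ ("CREATE".toList).length),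
        beq_false_of_length_ne (by rw [h5]; decide : w.length ≠ ("DROP".toList).length)]
      simp
    · by_cases h6 : w.length = 6
      · have e : pvKwByLen.getD ((w.length : Int)) [] =
            ["SELECT".toList, "INSERT".toList, "UPDATE".toList,
             "DELETE".toList, "PRAGMA".toList, "CREATE".toList] := by
          rw [h6]; decide
        rw [e]
        simp only [pvSqlKeywords, List.contains_cons, List.contains_nil,
          beq_false_of_length_ne (by rw [h6]; decide : w.length ≠ ("WITH".toList).length),
          beq_false_of_length_ne (by rw [h6]; decide : w.length ≠ ("DROP".toList).length),
          beq_false_of_length_ne (by rw [h6]; decide : w.length ≠ ("ALTER".toList).length)]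
        simp
      · have e : pvKwByLen = PySem.Dict.mk
            [((4 : Int), ["WITH".toList, "DROP".toList]),
             ((5 : Int), ["ALTER".toList]),
             ((6 : Int), ["SELECT".toList, "INSERT".toList, "UPDATE".toList,
                          "DELETE".toList, "PRAGMA".toList, "CREATE".toList])] := by decide
        have hc : pvKwByLen.contains ((w.length : Int)) = false := by
          rw [e]
          simp [PySem.Dict.contains_mk]
          omega
        rw [PySem.Dict.getD_of_not_contains _ _ hc]
        simp only [pvSqlKeywords, List.contains_cons, List.contains_nil,
          beq_false_of_length_ne (by rw [show ("SELECT".toList).length = 6 from rfl]; omega : w.length ≠ ("SELECT".toList).length),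
          beq_false_of_length_ne (by rw [show ("WITH".toList).length = 4 from rfl]; omega : w.length ≠ ("WITH".toList).length),
          beq_false_of_length_ne (by rw [show ("INSERT".toList).length = 6 from rfl]; omega : w.length ≠ ("INSERT".toList).length),
          beq_false_of_length_ne (by rw [show ("UPDATE".toList).length = 6 from rfl]; omega : w.length ≠ ("UPDATE".toList).length),
          beq_false_of_length_ne (by rw [show ("DELETE".toList).length = 6 from rfl]; omega : w.length ≠ ("DELETE".toList).length),
          beq_false_of_length_ne (by rw [show ("PRAGMA".toList).length = 6 from rfl]; omega : w.length ≠ ("PRAGMA".toList).length),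
          beq_false_of_length_ne (by rw [show ("CREATE".toList).length = 6 from rfl]; omega : w.length ≠ ("CREATE".toList).length),
          beq_false_of_length_ne (by rw [show ("DROP".toList).length = 4 from rfl]; omega : w.length ≠ ("DROP".toList).length),
          beq_false_of_length_ne (by rw [show ("ALTER".toList).length = 5 from rfl]; omega : w.length ≠ ("ALTER".toList).length)]
        simp

lemma endswith_last {s : List Char} (hs : s ≠ []) :
    PySem.Chars.endswith s [';'] = (s.getLast hs == ';') := by
  rw [Bool.eq_iff_iff, PySem.Chars.endswith_iff, beq_iff_eq]
  constructor
  · rintro ⟨p, hp⟩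
    have : (p ++ [';']).getLast (by simp) = ';' := by simp
    rw [← this]
    congr 1
    exact hp.symm
  · intro h
    exact ⟨s.dropLast, by conv_rhs => rw [← List.dropLast_append_getLast hs, h]⟩

-- ===== VERDICT (by name: the statement is the Claim_ definition above) =====
theorem is_sql_prompt_spec : Claim_equal_is_sql_prompt := by
  intro prompt hdom
  have hall : prompt.toList.all pvDomChar = true := hdom
  have hldom : (PySem.Chars.lstrip prompt.toList).all pvDomChar = true := by
    rw [List.all_eq_true] at hall ⊢
    intro x hx
    exact hall x ((List.dropWhile_sublist _).mem hx)
  have hs : pvRTrim (pvLTrim prompt.toList) = PySem.Chars.strip prompt.toList := by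
    rw [pvLTrim_eq_lstrip hall, pvRTrim_eq_rstrip hldom]; rfl
  unfold Spec_is_sql_prompt is_sql_prompt is_sql_prompt_alt
  simp only [hs]
  by_cases ht : PySem.Chars.strip prompt.toList = []
  · simp only [ht, dif_pos]
    by_cases hnil : prompt.toList = []
    · simp [hnil]
    · simp only [hnil, if_false, ht]
      decide
  · have hnil : prompt.toList ≠ [] := by
      intro e; exact ht (by rw [e]; rfl)
    simp only [hnil, if_false, dif_neg ht]
    set t := PySem.Chars.strip prompt.toList with htdef
    have hE : PySem.Chars.endswith t [';'] = (t.getLast ht == ';') := endswith_last ht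
    have hW : pvWord t = (PySem.Chars.upper t).takeWhile (fun c => c ≠ ' ') := pvWord_eq_takeWhile t
    have hK : pvSqlKeywords.contains ((PySem.Chars.upper t).takeWhile (fun c => c ≠ ' '))
        = pvSqlKeywords.any (fun kw => PySem.Chars.startswith (PySem.Chars.upper t) (kw ++ [' ']) || PySem.Chars.upper t == kw) := by
      simp only [pvSqlKeywords, List.contains_cons, List.contains_nil, List.any_cons, List.any_nil]
      rw [token_test_eq _ _ (by decide), token_test_eq _ _ (by decide),
        token_test_eq _ _ (by decide), token_test_eq _ _ (by decide),
        token_test_eq _ _ (by decide), token_test_eq _ _ (by decide),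
        token_test_eq _ _ (by decide), token_test_eq _ _ (by decide),
        token_test_eq _ _ (by decide)]
    rw [bucket_eq, hW, hK, hE]
    cases hKb : pvSqlKeywords.any (fun kw => PySem.Chars.startswith (PySem.Chars.upper t) (kw ++ [' ']) || PySem.Chars.upper t == kw) <;>
      by_cases hL : t.getLast ht = ';' <;> simp [hL] <;> exact hL
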